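-- pv_equiv track=rewrite | github.com/Nukaze/BU-Verse | BUVerse.py | buvs_txtlimitlenght
-- ===== SOURCE A (Python) =====
-- def buvs_txtlimitlenght(txtlimit,gettxt):
--     newinsert = ""
--     for i, letter in enumerate(gettxt):
--         if i % txtlimit == 0:
--             newinsert += '\n'
--         newinsert += letter
--     newinsert = newinsert[1:]
--     return newinsert
-- ===== SOURCE B (Python) =====
-- def buvs_txtlimitlenght(txtlimit, gettxt):
--     return '\n'.join(gettxt[i:i + txtlimit] for i in range(0, len(gettxt), txtlimit))
-- ===== Notes on version B (the rewrite author's own statement) =====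
-- stated objective: simpler
-- what changed: B slices gettxt into txtlimit-sized chunks and joins them with '\n' over a stepped range, instead of A's per-character loop with a modulo test that prepends '\n' and then strips the leading newline; Pre_ restricts to positive txtlimit, the natural domain of a line-length limit (txtlimit==0 makes A raise ZeroDivisionError on any nonempty string, and a negative limit is malformed input on which A's grouping by the magnitude is an accident of Python's modulo sign rule).
-- outside the precondition, e.g. on buvs_txtlimitlenght(-3, 'hello'): A returns 'hel\nlo', B returns ''; on buvs_txtlimitlenght(0, ''): A returns '', B raises ValueError
import Mathlib
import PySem

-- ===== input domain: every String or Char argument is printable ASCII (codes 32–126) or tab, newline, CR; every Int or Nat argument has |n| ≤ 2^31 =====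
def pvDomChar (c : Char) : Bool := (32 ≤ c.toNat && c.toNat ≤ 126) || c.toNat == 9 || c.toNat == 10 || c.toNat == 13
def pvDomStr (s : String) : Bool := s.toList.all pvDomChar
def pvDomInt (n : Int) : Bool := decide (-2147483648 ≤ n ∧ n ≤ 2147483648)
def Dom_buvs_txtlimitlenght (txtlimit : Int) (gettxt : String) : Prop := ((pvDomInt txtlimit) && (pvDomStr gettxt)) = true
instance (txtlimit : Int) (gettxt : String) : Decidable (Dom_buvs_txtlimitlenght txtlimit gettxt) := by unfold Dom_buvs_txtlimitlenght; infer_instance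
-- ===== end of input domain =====

-- B replaces A's per-character loop (modulo test, prepend '\n', strip the leading one)
-- by slicing the text into txtlimit-sized chunks and joining them with '\n' (objective: simpler).

-- ===== PORT A =====
def buvs_txtlimitlenght (txtlimit : Int) (gettxt : String) : String :=
  -- newinsert = ""; for i, letter in enumerate(gettxt): if i % txtlimit == 0: newinsert += '\n'; newinsert += letter
  let newinsert : List Char :=
    (PySem.List.enumerate gettxt.toList 0).foldl
      (fun acc p =>
        (if PySem.Int.mod p.1 txtlimit = 0 then acc ++ ['\n'] else acc) ++ [p.2]) []
  -- newinsert = newinsert[1:]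
  String.ofList (PySem.List.slice newinsert (some 1) none)

-- ===== PORT B =====
def buvs_txtlimitlenght_alt (txtlimit : Int) (gettxt : String) : String :=
  -- return '\n'.join(gettxt[i:i+txtlimit] for i in range(0, len(gettxt), txtlimit))
  PySem.Str.join "\n"
    ((PySem.List.pyRange 0 (PySem.Str.len gettxt) txtlimit).map
      (fun i => PySem.Str.slice gettxt (some i) (some (i + txtlimit))))

-- ===== PRECONDITION & SPEC =====
-- Pre_ restricts to positive txtlimit, the natural domain of a line-length limit:
-- txtlimit == 0 makes A raise ZeroDivisionError on any nonempty string (and B's range(..., 0)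
-- raises ValueError even on the empty one), and a negative limit is malformed input on which
-- A's grouping by the magnitude is an accident of Python's modulo sign rule.
def Pre_buvs_txtlimitlenght (txtlimit : Int) (gettxt : String) : Prop := 1 ≤ txtlimit
instance (txtlimit : Int) (gettxt : String) : Decidable (Pre_buvs_txtlimitlenght txtlimit gettxt) := by unfold Pre_buvs_txtlimitlenght; infer_instance
def pvWitness_buvs_txtlimitlenght : Int × String := (3, "hello world")

def Spec_buvs_txtlimitlenght (txtlimit : Int) (gettxt : String) (out : String) : Prop := out = buvs_txtlimitlenght_alt txtlimit gettxt
instance (txtlimit : Int) (gettxt : String) (out : String) : Decidable (Spec_buvs_txtlimitlenght txtlimit gettxt out) := by unfold Spec_buvs_txtlimitlenght; infer_instance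

-- ===== CLAIM (what is proved, stated in full; the proofs are below) =====
def Claim_equal_buvs_txtlimitlenght : Prop := ∀ (txtlimit : Int) (gettxt : String), Dom_buvs_txtlimitlenght txtlimit gettxt → Pre_buvs_txtlimitlenght txtlimit gettxt → Spec_buvs_txtlimitlenght txtlimit gettxt (buvs_txtlimitlenght txtlimit gettxt)

-- ===== LEMMAS AND PROOFS =====

-- the list of k-sized chunks of cs (used only with 0 < k)
def pvChunks (k : Nat) (cs : List Char) : List (List Char) :=
  if h : k = 0 ∨ cs = [] then [] else cs.take k :: pvChunks k (cs.drop k)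
termination_by cs.length
decreasing_by
  push_neg at h
  have h1 : 0 < cs.length := List.length_pos_of_ne_nil h.2
  have h2 : 0 < k := Nat.pos_of_ne_zero h.1
  simp only [List.length_drop]
  omega

-- what A's loop body appends for the char at absolute index p.1 (modulo test as divisibility)
def pvEmit (k : Nat) (p : Int × Char) : List Char :=
  (if (k : Int) ∣ p.1 then ['\n'] else []) ++ [p.2]

theorem pvEmit_flatMap_shift (k : Nat) :
    ∀ (cs : List Char) (i : Int),
      (PySem.List.enumerate cs (i + k)).flatMap (pvEmit k)
        = (PySem.List.enumerate cs i).flatMap (pvEmit k) := by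
  intro cs
  induction cs with
  | nil => intro i; simp [PySem.List.enumerate_nil]
  | cons c rest ih =>
    intro i
    rw [PySem.List.enumerate_cons, PySem.List.enumerate_cons]
    simp only [List.flatMap_cons]
    have h1 : (i + (k : Int)) + 1 = (i + 1) + (k : Int) := by ring
    rw [h1, ih (i + 1)]
    have h2 : ((k : Int) ∣ i + k) ↔ ((k : Int) ∣ i) := dvd_add_self_right
    simp only [pvEmit]
    by_cases hd : (k : Int) ∣ i
    · rw [if_pos (h2.mpr hd), if_pos hd]
    · rw [if_neg (fun h => hd (h2.mp h)), if_neg hd]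

theorem pvEmit_flatMap_mid (k : Nat) :
    ∀ (cs : List Char) (i : Int), 0 < i → i + cs.length ≤ (k : Int) →
      (PySem.List.enumerate cs i).flatMap (pvEmit k) = cs := by
  intro cs
  induction cs with
  | nil => intro i _ _; simp [PySem.List.enumerate_nil]
  | cons c rest ih =>
    intro i hi hle
    rw [PySem.List.enumerate_cons]
    simp only [List.flatMap_cons]
    simp only [List.length_cons] at hle
    have hnd : ¬ ((k : Int) ∣ i) := by
      intro hd
      have := Int.le_of_dvd hi hd
      push_cast at hle
      omega
    rw [ih (i + 1) (by omega) (by push_cast at hle ⊢; omega)]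
    simp [pvEmit, hnd]

-- A's flatMap over the enumerated text is '\n' followed by the '\n'-joined chunks
theorem pvEmit_flatMap_chunks (k : Nat) (hk : 0 < k) :
    ∀ (cs : List Char),
      (PySem.List.enumerate cs 0).flatMap (pvEmit k)
        = (match pvChunks k cs with
           | [] => []
           | _ :: _ => '\n' :: PySem.Chars.join ['\n'] (pvChunks k cs)) := by
  intro cs
  induction hn : cs.length using Nat.strong_induction_on generalizing cs with
  | _ n ih =>
    match cs with
    | [] => simp [PySem.List.enumerate_nil, pvChunks]
    | c :: rest =>
      have hchunks : pvChunks k (c :: rest)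
          = (c :: rest).take k :: pvChunks k ((c :: rest).drop k) := by
        rw [pvChunks]; simp [hk.ne']
      have hsplit : c :: rest = (c :: rest).take k ++ (c :: rest).drop k :=
        (List.take_append_drop k (c :: rest)).symm
      have htake : (c :: rest).take k = c :: rest.take (k - 1) := by
        cases k with
        | zero => omega
        | succ m => simp [List.take_succ_cons]
      have hfirst : (PySem.List.enumerate ((c :: rest).take k) 0).flatMap (pvEmit k)
          = '\n' :: (c :: rest).take k := by
        rw [htake, PySem.List.enumerate_cons]
        simp only [List.flatMap_cons]
        rw [zero_add]
        rw [pvEmit_flatMap_mid k (rest.take (k - 1)) 1 (by omega)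
            (by have := List.length_take_le (k - 1) rest; push_cast; omega)]
        simp [pvEmit]
      by_cases hdrop : (c :: rest).drop k = []
      · -- the whole text is a single chunk
        have htk : (c :: rest).take k = c :: rest := by
          conv_rhs => rw [hsplit]
          rw [hdrop, List.append_nil]
        rw [hchunks, hdrop]
        conv_lhs => rw [hsplit, hdrop, List.append_nil]
        rw [hfirst, htk]
        simp [pvChunks, PySem.Chars.join_singleton]
      · -- first chunk, then the rest of the text
        have hlen : ((c :: rest).take k).length = k := by
          rw [List.length_take]
          have : k < (c :: rest).length := by
            by_contra h
            exact hdrop (List.drop_eq_nil_of_le (by omega))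
          omega
        conv_lhs => rw [hsplit]
        rw [PySem.List.enumerate_append, List.flatMap_append, hfirst, hlen]
        rw [zero_add]
        have hshift := pvEmit_flatMap_shift k ((c :: rest).drop k) 0
        simp only [zero_add] at hshift
        have hih := ih ((c :: rest).drop k).length
          (by
            rw [← hn, List.length_drop]
            have : 0 < (c :: rest).length := by simp
            omega)
          ((c :: rest).drop k) rfl
        rw [hshift, hih]
        match hdc : pvChunks k ((c :: rest).drop k) with
        | [] =>
          exfalso
          rw [pvChunks] at hdc
          simp [hk.ne', hdrop] at hdc
        | d :: ds =>
          rw [hchunks, hdc, PySem.Chars.join_cons_cons]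
          simp

-- a stepped range with positive step peels off its first element
theorem pvRange_pos_cons (a b k : Int) (hk : 0 < k) (hab : a < b) :
    PySem.List.pyRange a b k = a :: PySem.List.pyRange (a + k) b k := by
  rw [PySem.List.pyRange_of_pos _ _ hk, PySem.List.pyRange_of_pos _ _ hk]
  have hdiv : (b - a + k - 1) / k = (b - a - 1) / k + 1 := by
    have h3 : b - a + k - 1 = (b - a - 1) + 1 * k := by ring
    rw [h3, Int.add_mul_ediv_right _ _ (by omega : k ≠ 0)]
  have hq0 : 0 ≤ (b - a - 1) / k := Int.ediv_nonneg (by omega) (by omega)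
  have hcount : (if a < b then ((b - a + k - 1) / k).toNat else 0)
      = (if a + k < b then ((b - (a + k) + k - 1) / k).toNat else 0) + 1 := by
    rw [if_pos hab]
    by_cases h2 : a + k < b
    · rw [if_pos h2]
      have : b - (a + k) + k - 1 = b - a - 1 := by ring
      rw [this, hdiv]
      omega
    · rw [if_neg h2]
      have hz : (b - a - 1) / k = 0 := Int.ediv_eq_zero_of_lt (by omega) (by omega)
      rw [hdiv, hz]
      norm_num
  rw [hcount, List.range_succ_eq_map, List.map_cons, List.map_map]
  refine congrArg₂ _ (by ring) ?_
  refine List.map_congr_left (fun j _ => ?_)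
  simp only [Function.comp_apply]
  push_cast
  ring

-- B's mapped stepped range computes exactly the chunk list (j is the current start offset)
theorem pvMap_slice_chunks (k : Nat) (hk : 0 < k) (cs : List Char) :
    ∀ (j : Nat),
      (PySem.List.pyRange (j : Int) (cs.length : Int) (k : Int)).map
          (fun i => PySem.List.slice cs (some i) (some (i + (k : Int))))
        = pvChunks k (cs.drop j) := by
  intro j
  induction hm : cs.length - j using Nat.strong_induction_on generalizing j with
  | _ m ih =>
    by_cases hj : j < cs.length
    · rw [pvRange_pos_cons _ _ _ (by exact_mod_cast hk) (by exact_mod_cast hj)]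
      rw [List.map_cons]
      have hcast : ((j : Int) + (k : Int)) = (((j + k : Nat)) : Int) := by push_cast; ring
      have hhead : PySem.List.slice cs (some (j : Int)) (some ((j : Int) + (k : Int)))
          = (cs.drop j).take k := PySem.List.slice_natCast_add cs j k
      rw [hhead, hcast, ih (cs.length - (j + k)) (by omega) (j + k) rfl]
      have hne : cs.drop j ≠ [] := by
        intro h
        have := List.length_drop (l := cs) (i := j)
        rw [h] at this
        simp at this
        omega
      conv_rhs => rw [pvChunks]
      rw [dif_neg (by push_neg; exact ⟨hk.ne', hne⟩)]
      rw [List.drop_drop]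
    · have hrange : PySem.List.pyRange (j : Int) (cs.length : Int) (k : Int) = [] := by
        rw [PySem.List.pyRange_of_pos _ _ (by exact_mod_cast hk : (0:Int) < k)]
        rw [if_neg (by exact_mod_cast hj)]
        simp
      rw [hrange, List.drop_eq_nil_of_le (by omega), List.map_nil, pvChunks]
      simp

-- ===== VERDICT (by name: the statement is the Claim_ definition above) =====
theorem buvs_txtlimitlenght_spec : Claim_equal_buvs_txtlimitlenght := by
  intro t s _ hPre
  unfold Spec_buvs_txtlimitlenght
  have hkpos : (0 : Int) < t := hPre
  set k : Nat := t.toNat with hkdef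
  have hk : 0 < k := by omega
  have ht : ((k : Int)) = t := Int.toNat_of_nonneg (by omega)
  apply String.toList_inj.mp
  set cs : List Char := s.toList with hcs
  -- A's side
  have hfeq : (fun (acc : List Char) (p : Int × Char) =>
      (if PySem.Int.mod p.1 t = 0 then acc ++ ['\n'] else acc) ++ [p.2])
      = (fun acc p => acc ++ pvEmit k p) := by
    funext acc p
    have hiff : (PySem.Int.mod p.1 t = 0) ↔ ((k : Int) ∣ p.1) := by
      rw [PySem.Int.mod_eq_zero_iff_dvd, ht]
    simp only [pvEmit]
    by_cases hd : (k : Int) ∣ p.1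
    · rw [if_pos (hiff.mpr hd), if_pos hd, List.append_assoc]
    · rw [if_neg (fun h => hd (hiff.mp h)), if_neg hd, List.nil_append]
  have hA : buvs_txtlimitlenght t s
      = String.ofList (PySem.List.slice
          ((PySem.List.enumerate cs 0).flatMap (pvEmit k)) (some 1) none) := by
    unfold buvs_txtlimitlenght
    rw [hfeq, PySem.List.foldl_append_eq_flatMap, List.nil_append]
  rw [hA, String.toList_ofList, PySem.List.slice_from_one,
      pvEmit_flatMap_chunks k hk cs]
  -- B's side
  unfold buvs_txtlimitlenght_alt
  rw [PySem.Str.toList_join, List.map_map]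
  have hmapeq : (List.map (String.toList ∘ fun i =>
        PySem.Str.slice s (some i) (some (i + t)))
        (PySem.List.pyRange 0 (PySem.Str.len s) t))
      = (PySem.List.pyRange ((0 : Nat) : Int) (cs.length : Int) (k : Int)).map
          (fun i => PySem.List.slice cs (some i) (some (i + (k : Int)))) := by
    rw [PySem.Str.len_eq, ← hcs, ht]
    refine List.map_congr_left (fun i _ => ?_)
    simp only [Function.comp_apply]
    rw [PySem.Str.toList_slice]
    rfl
  rw [hmapeq, pvMap_slice_chunks k hk cs 0, List.drop_zero]
  have hsep : ("\n" : String).toList = ['\n'] := rfl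
  rw [hsep]
  -- tail of ('\n' :: join) is the join; tail of [] is join of []
  match hdc : pvChunks k cs with
  | [] => simp [PySem.Chars.join_nil]
  | d :: ds => simp
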